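-- pv_equiv track=rewrite | github.com/microscaler/rerp | tooling/src/rerp_tooling/ci/get_latest_tag.py | _fibonacci_backoff_sequence
-- ===== SOURCE A (Python) =====
-- def _fibonacci_backoff_sequence(max_total_seconds: int = 300) -> list[int]:
--     """Generate Fibonacci backoff sequence up to max_total_seconds.
--
--     Returns list of wait times in seconds: [1, 1, 2, 3, 5, 8, 13, 21, 34, 55, 89, ...]
--     Stops when cumulative sum would exceed max_total_seconds.
--     """
--     sequence = []
--     total = 0
--     a, b = 1, 1
--     while total + a <= max_total_seconds:
--         sequence.append(a)
--         total += a
--         a, b = b, a + b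
--     return sequence
-- ===== SOURCE B (Python) =====
-- def _fibonacci_backoff_sequence(max_total_seconds: int = 300) -> list[int]:
--     """Two-pass: generate all Fibonacci terms <= max_total_seconds, then keep
--     each term whose inclusive running total stays within max_total_seconds."""
--     terms = []
--     a, b = 1, 1
--     while a <= max_total_seconds:
--         terms.append(a)
--         a, b = b, a + b
--     result = []
--     s = 0
--     for t in terms:
--         s += t
--         if s <= max_total_seconds:
--             result.append(t)
--     return result
-- ===== Notes on version B (the rewrite author's own statement) =====
-- stated objective: alternative
-- what changed: A interleaves generation and the cumulative-sum stopping test in one while loop; B first generates every Fibonacci term <= max_total_seconds, then in a separate pass keeps each term whose inclusive running total is within the budget (valid because the positive terms make the running total monotone).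
import Mathlib
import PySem

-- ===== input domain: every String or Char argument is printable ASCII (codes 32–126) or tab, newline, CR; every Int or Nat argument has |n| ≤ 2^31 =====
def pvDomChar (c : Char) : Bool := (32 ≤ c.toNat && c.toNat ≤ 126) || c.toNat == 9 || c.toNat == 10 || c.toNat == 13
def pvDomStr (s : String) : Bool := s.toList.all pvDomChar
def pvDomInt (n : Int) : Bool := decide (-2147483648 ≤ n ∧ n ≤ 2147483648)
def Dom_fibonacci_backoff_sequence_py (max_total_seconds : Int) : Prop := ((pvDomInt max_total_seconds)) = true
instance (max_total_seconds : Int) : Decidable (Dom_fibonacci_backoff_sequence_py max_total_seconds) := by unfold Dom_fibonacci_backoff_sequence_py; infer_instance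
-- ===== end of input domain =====

-- B replaces A's single fused loop by two passes — generate Fibonacci terms ≤ max, then filter by running cumulative sum (alternative decomposition, same cost).


-- ===== PORT A =====
-- A's while loop, fuel-bounded (total grows by a ≥ 1 each step, so max.toNat+2 iterations always suffice)
def fibALoop (maxT : Int) : Nat → Int → Int → Int → List Int
  | 0, _, _, _ => []
  | fuel + 1, total, a, b =>
    if total + a ≤ maxT then a :: fibALoop maxT fuel (total + a) b (a + b) else []

def fibonacci_backoff_sequence_py (max_total_seconds : Int) : List Int :=
  fibALoop max_total_seconds (max_total_seconds.toNat + 2) 0 1 1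

-- ===== PORT B =====
-- pass 1 of Source B: all Fibonacci terms ≤ max (fuel-bounded; a ≥ (step-1), so max.toNat+2 suffices)
def genTerms (maxT : Int) : Nat → Int → Int → List Int
  | 0, _, _ => []
  | fuel + 1, a, b =>
    if a ≤ maxT then a :: genTerms maxT fuel b (a + b) else []

-- pass 2 of Source B: keep each term whose inclusive running total stays ≤ max
def cumFilter (maxT : Int) : List Int → Int → List Int
  | [], _ => []
  | t :: ts, s =>
    if s + t ≤ maxT then t :: cumFilter maxT ts (s + t) else cumFilter maxT ts (s + t)

def fibonacci_backoff_sequence_py_alt (max_total_seconds : Int) : List Int :=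
  cumFilter max_total_seconds (genTerms max_total_seconds (max_total_seconds.toNat + 2) 1 1) 0

-- ===== PRECONDITION & SPEC =====
def Spec_fibonacci_backoff_sequence_py (max_total_seconds : Int) (out : List Int) : Prop := out = fibonacci_backoff_sequence_py_alt max_total_seconds
instance (max_total_seconds : Int) (out : List Int) : Decidable (Spec_fibonacci_backoff_sequence_py max_total_seconds out) := by unfold Spec_fibonacci_backoff_sequence_py; infer_instance

-- ===== CLAIM (what is proved, stated in full; the proofs are below) =====
def Claim_equal_fibonacci_backoff_sequence_py : Prop := ∀ (max_total_seconds : Int), Dom_fibonacci_backoff_sequence_py max_total_seconds → Spec_fibonacci_backoff_sequence_py max_total_seconds (fibonacci_backoff_sequence_py max_total_seconds)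

-- ===== LEMMAS AND PROOFS =====

-- every generated term is ≥ 1 (the seeds are ≥ 1 and Fibonacci steps preserve it)
theorem genTerms_pos (maxT : Int) (f : Nat) :
    ∀ a b, 1 ≤ a → 1 ≤ b → ∀ t ∈ genTerms maxT f a b, 1 ≤ t := by
  induction f with
  | zero => intro a b _ _ t ht; simp [genTerms] at ht
  | succ f ih =>
    intro a b ha hb t ht
    simp only [genTerms] at ht
    split at ht
    · rcases List.mem_cons.mp ht with h | h
      · omega
      · exact ih b (a + b) hb (by omega) t h
    · simp at ht

-- once the running total is over budget it stays over (terms are ≥ 1), so the filter drops everything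
theorem cumFilter_over (maxT : Int) :
    ∀ (ts : List Int) (s : Int), (∀ t ∈ ts, 1 ≤ t) → maxT < s → cumFilter maxT ts s = [] := by
  intro ts
  induction ts with
  | nil => intro s _ _; rfl
  | cons t ts ih =>
    intro s hpos hs
    have ht : 1 ≤ t := hpos t (List.mem_cons_self ..)
    simp only [cumFilter]
    rw [if_neg (by omega)]
    exact ih (s + t) (fun x hx => hpos x (List.mem_cons_of_mem _ hx)) (by omega)

-- the fused loop of A equals the filtered generated list, for matching fuels
theorem main_lemma (maxT : Int) (f : Nat) :
    ∀ total a b, 0 ≤ total → 1 ≤ a → 1 ≤ b →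
      fibALoop maxT f total a b = cumFilter maxT (genTerms maxT f a b) total := by
  induction f with
  | zero => intro total a b _ _ _; rfl
  | succ f ih =>
    intro total a b htot ha hb
    simp only [fibALoop, genTerms]
    by_cases h : total + a ≤ maxT
    · rw [if_pos h, if_pos (by omega)]
      simp only [cumFilter]
      rw [if_pos h, ih (total + a) b (a + b) (by omega) hb (by omega)]
    · rw [if_neg h]
      by_cases h2 : a ≤ maxT
      · rw [if_pos h2]
        simp only [cumFilter]
        rw [if_neg h]
        exact (cumFilter_over maxT _ (total + a)
          (genTerms_pos maxT f b (a + b) hb (by omega)) (by omega)).symm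
      · rw [if_neg h2]; rfl

-- ===== VERDICT (by name: the statement is the Claim_ definition above) =====
theorem fibonacci_backoff_sequence_py_spec : Claim_equal_fibonacci_backoff_sequence_py := by
  intro m _
  unfold Spec_fibonacci_backoff_sequence_py fibonacci_backoff_sequence_py fibonacci_backoff_sequence_py_alt
  exact main_lemma m (m.toNat + 2) 0 1 1 (by omega) (by omega) (by omega)
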